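-- pv_equiv track=rewrite | github.com/Miracle-QCC/self_work | Overcooked/PPO.py | calculate_rewards
-- ===== SOURCE A (Python) =====
-- def calculate_rewards(events):
--     # Define the rewards/penalties for different actions
--     ONION_PICKUP_REWARD = 0
--     USEFUL_ONION_PICKUP_REWARD = 2  # 1
--     USEFUL_ONION_DROP_REWARD = 2
--     VIABLE_ONION_POTTING_REWARD = 3
--     OPTIMAL_ONION_POTTING_REWARD = 1
--     DISH_PICKUP_REWARD = 1
--     USEFUL_DISH_PICKUP_REWARD = 3
--     SOUP_COOKING_REWARD = 4  # ???
--     SOUP_PICKUP_REWARD = 5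
--     SOUP_DELIVERY_REWARD = 20
--
--     ONION_DROP_PENALTY = -3
--     UNPRODUCTIVE_POTTING_PENALTY = -2
--     useful_dishdrop = 4
--     CATASTROPHIC_POTTING_PENALTY = -6
--     USELESS_ONION_POTTING_PENALTY = -3
--     SOUP_DROP_PENALTY = -15
--     USELESS_ACTION_PENALTY = -1
--     DISH_DROP_PENALTY = -4
--     USEFUL_DISH_DROP_PENALTY = -3
--
--     # Initialize rewards for each agent
--     rewards = [0, 0]
--
--     # Analyze the actions and assign rewards/penalties
--     for agent_id in range(2):
--         if len(events[agent_id]) != 0:  # if event happened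
--             if 'onion_pickup' in events[agent_id]:
--                 rewards[agent_id] += ONION_PICKUP_REWARD
--             if 'useful_onion_pickup' in events[agent_id]:
--                 rewards[agent_id] += USEFUL_ONION_PICKUP_REWARD
--             if 'useful_onion_drop' in events[agent_id]:
--                 rewards[agent_id] += USEFUL_ONION_DROP_REWARD
--             if 'optimal_onion_potting' in events[agent_id]:
--                 rewards[agent_id] += OPTIMAL_ONION_POTTING_REWARD
--             if 'viable_onion_potting' in events[agent_id]:
--                 rewards[agent_id] += VIABLE_ONION_POTTING_REWARD
--             if 'useful_onion_drop' in events[agent_id]: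
--                 rewards[agent_id] += USEFUL_ONION_DROP_REWARD
--             if 'soup_cooking' in events[agent_id]:
--                 rewards[agent_id] += SOUP_COOKING_REWARD
--             if 'useful_dish_pickup' in events[agent_id]:
--                 rewards[agent_id] += USEFUL_DISH_PICKUP_REWARD
--             if 'soup_pickup' in events[agent_id]:
--                 rewards[agent_id] += SOUP_PICKUP_REWARD
--             if 'soup_delivery' in events[agent_id]:
--                 rewards[agent_id] += SOUP_DELIVERY_REWARD
--
--             if 'onion_drop' in events[agent_id] and 'useful_onion_drop' not in events[agent_id]:
--                 rewards[agent_id] += ONION_DROP_PENALTY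
--             if 'useless_onion_potting' in events[agent_id]:
--                 rewards[agent_id] += USELESS_ONION_POTTING_PENALTY
--             if 'catastrophic_onion_potting' in events[agent_id]:
--                 rewards[agent_id] += CATASTROPHIC_POTTING_PENALTY
--             if 'dish_drop' in events[agent_id] and 'useful_dish_drop' not in events[agent_id]:
--                 rewards[agent_id] += DISH_DROP_PENALTY
--     return rewards
-- ===== SOURCE B (Python) =====
-- # B iterates over the agent's distinct events and sums dict-weight lookups
-- # (drop penalties folded into the weights, cancelled when the useful variant
-- # is also present), instead of testing each known event for membership.
-- _W = {
--     'onion_pickup': 0,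
--     'useful_onion_pickup': 2,
--     'useful_onion_drop': 4,   # A checks this event twice at +2 each
--     'optimal_onion_potting': 1,
--     'viable_onion_potting': 3,
--     'soup_cooking': 4,
--     'useful_dish_pickup': 3,
--     'soup_pickup': 5,
--     'soup_delivery': 20,
--     'useless_onion_potting': -3,
--     'catastrophic_onion_potting': -6,
--     'onion_drop': -3,
--     'dish_drop': -4,
-- }
--
-- def calculate_rewards(events):
--     out = []
--     for ev in (events[0], events[1]):
--         seen = set(ev)
--         r = sum(_W.get(e, 0) for e in seen)
--         if 'onion_drop' in seen and 'useful_onion_drop' in seen: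
--             r += 3   # cancel the drop penalty: A only charges it without the useful drop
--         if 'dish_drop' in seen and 'useful_dish_drop' in seen:
--             r += 4
--         out.append(r)
--     return out
-- ===== Notes on version B (the rewrite author's own statement) =====
-- stated objective: alternative
-- what changed: Instead of testing each known event name for membership in the agent's list, B deduplicates the agent's event list into a set and sums a dict-weight lookup per distinct event, with the two drop penalties folded into the weights and cancelled back when the corresponding useful variant is also present (the double-checked 'useful_onion_drop' carries weight 4).
import Mathlib
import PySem

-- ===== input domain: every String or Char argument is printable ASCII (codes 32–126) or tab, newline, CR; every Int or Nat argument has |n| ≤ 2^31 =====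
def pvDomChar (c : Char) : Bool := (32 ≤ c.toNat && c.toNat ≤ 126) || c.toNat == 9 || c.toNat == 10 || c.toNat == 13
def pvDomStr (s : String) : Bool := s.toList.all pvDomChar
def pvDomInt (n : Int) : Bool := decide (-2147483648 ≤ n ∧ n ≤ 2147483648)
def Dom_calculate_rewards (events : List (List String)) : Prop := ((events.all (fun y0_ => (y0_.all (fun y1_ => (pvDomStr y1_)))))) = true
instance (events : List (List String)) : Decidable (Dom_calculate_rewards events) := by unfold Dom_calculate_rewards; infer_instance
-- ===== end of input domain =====

-- B iterates over each agent's DISTINCT events summing weights from a dict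
-- (drop penalties folded into the weights and cancelled when the useful
-- variant is present), instead of A's membership test per known event;
-- objective: alternative (different traversal, same cost).


-- ===== PORT A =====
-- the body of A's loop for one agent: the running value rewards[agent_id]
-- after the chain of if/+= statements (Python reads and writes rewards[agent_id]
-- after each if; accumulating in r and writing once is observationally the same)
def pvAddA (r0 : Int) (ev : List String) : Int :=
  let r := r0
  let r := if "onion_pickup" ∈ ev then r + 0 else r
  let r := if "useful_onion_pickup" ∈ ev then r + 2 else r
  let r := if "useful_onion_drop" ∈ ev then r + 2 else r
  let r := if "optimal_onion_potting" ∈ ev then r + 1 else r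
  let r := if "viable_onion_potting" ∈ ev then r + 3 else r
  let r := if "useful_onion_drop" ∈ ev then r + 2 else r
  let r := if "soup_cooking" ∈ ev then r + 4 else r
  let r := if "useful_dish_pickup" ∈ ev then r + 3 else r
  let r := if "soup_pickup" ∈ ev then r + 5 else r
  let r := if "soup_delivery" ∈ ev then r + 20 else r
  let r := if "onion_drop" ∈ ev ∧ "useful_onion_drop" ∉ ev then r + (-3) else r
  let r := if "useless_onion_potting" ∈ ev then r + (-3) else r
  let r := if "catastrophic_onion_potting" ∈ ev then r + (-6) else r
  let r := if "dish_drop" ∈ ev ∧ "useful_dish_drop" ∉ ev then r + (-4) else r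
  r

-- one iteration of 'for agent_id in range(2)'
def pvStepA (events : List (List String)) (rewards : List Int) (agent_id : Int) : List Int :=
  match PySem.List.pyGet? events agent_id with
  | none => rewards          -- Python raises IndexError here; excluded by Pre_
  | some ev =>
    if ev.length ≠ 0 then
      -- agent_id ∈ {0,1} is nonnegative, so .toNat is exact here
      rewards.set agent_id.toNat (pvAddA (PySem.List.pyGetD rewards agent_id 0) ev)
    else rewards

def calculate_rewards (events : List (List String)) : List Int :=
  (PySem.List.pyRange 0 2 1).foldl (pvStepA events) [0, 0]

-- ===== PORT B =====
def pvW : PySem.Dict String Int := PySem.Dict.mk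
  [("onion_pickup", 0), ("useful_onion_pickup", 2), ("useful_onion_drop", 4),
   ("optimal_onion_potting", 1), ("viable_onion_potting", 3), ("soup_cooking", 4),
   ("useful_dish_pickup", 3), ("soup_pickup", 5), ("soup_delivery", 20),
   ("useless_onion_potting", -3), ("catastrophic_onion_potting", -6),
   ("onion_drop", -3), ("dish_drop", -4)]

-- one body of B's 'for ev in (events[0], events[1])' loop
def pvScoreB (ev : List String) : Int :=
  let seen : PySem.Set String := PySem.Set.ofList ev
  -- sum(_W.get(e, 0) for e in seen): order-independent consumption of the set
  let r := seen.foldl (fun r e => r + PySem.Dict.getD pvW e 0) 0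
  let r := if "onion_drop" ∈ seen ∧ "useful_onion_drop" ∈ seen then r + 3 else r
  if "dish_drop" ∈ seen ∧ "useful_dish_drop" ∈ seen then r + 4 else r

def calculate_rewards_alt (events : List (List String)) : List Int :=
  match PySem.List.pyGet? events 0, PySem.List.pyGet? events 1 with
  | some a, some b => [pvScoreB a, pvScoreB b]
  | _, _ => []               -- unreachable under Pre_: Python B raises IndexError

-- ===== PRECONDITION & SPEC =====
-- A indexes events[0] and events[1]; on fewer than two event lists it raises IndexError.
def Pre_calculate_rewards (events : List (List String)) : Prop := 2 ≤ events.length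
instance (events : List (List String)) : Decidable (Pre_calculate_rewards events) := by unfold Pre_calculate_rewards; infer_instance
def pvWitness_calculate_rewards : List (List String) := [["soup_delivery", "onion_drop"], []]

def Spec_calculate_rewards (events : List (List String)) (out : List Int) : Prop := out = calculate_rewards_alt events
instance (events : List (List String)) (out : List Int) : Decidable (Spec_calculate_rewards events out) := by unfold Spec_calculate_rewards; infer_instance

-- ===== CLAIM (what is proved, stated in full; the proofs are below) =====
def Claim_equal_calculate_rewards : Prop := ∀ (events : List (List String)), Dom_calculate_rewards events → Pre_calculate_rewards events → Spec_calculate_rewards events (calculate_rewards events)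

-- ===== LEMMAS AND PROOFS =====

theorem pv_ite_add (c : Prop) [Decidable c] (r v : Int) :
    (if c then r + v else r) = r + (if c then v else 0) := by
  split <;> simp

-- pulling one key out of a Nodup-indexed sum
theorem pv_sum_ite (k : String) (v : Int) (g : String → Int) :
    ∀ (s : List String), s.Nodup →
    (s.map (fun e => if k = e then v else g e)).sum
      = (if k ∈ s then v - g k else 0) + (s.map g).sum := by
  intro s
  induction s with
  | nil => simp
  | cons a s' ih =>
    intro hnd
    have ha : a ∉ s' := (List.nodup_cons.mp hnd).1
    have hnd' : s'.Nodup := (List.nodup_cons.mp hnd).2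
    by_cases hk : k = a
    · subst hk
      have : (s'.map (fun e => if k = e then v else g e)) = s'.map g := by
        apply List.map_congr_left
        intro e he
        have : k ≠ e := fun h => ha (h ▸ he)
        simp [this]
      simp [this, ha]
      ring
    · have hmem : (k ∈ a :: s') ↔ (k ∈ s') := by simp [hk]
      simp only [List.map_cons, List.sum_cons, ih hnd', hmem]
      have : (if k = a then v else g a) = g a := by simp [hk]
      rw [this]; ring

-- value of a missing key
theorem pv_getD_not_mem (ps : List (String × Int)) (k : String)
    (h : k ∉ ps.map Prod.fst) : PySem.Dict.getD (PySem.Dict.mk ps) k 0 = 0 := by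
  induction ps with
  | nil => rfl
  | cons p ps' ih =>
    have h1 : p.1 ≠ k := by
      intro he; exact h (by simp [← he])
    rw [PySem.Dict.getD_eq_get?_getD, PySem.Dict.get?_mk_cons]
    simp only [beq_iff_eq, h1, if_false]
    rw [← PySem.Dict.getD_eq_get?_getD]
    exact ih (fun hm => h (by simp [hm]))

-- the dict-lookup sum over a duplicate-free list equals the membership-weighted
-- sum over the dict's entries
theorem pv_sum_lookup (ps : List (String × Int)) (s : List String)
    (hs : s.Nodup) (hk : (ps.map Prod.fst).Nodup) :
    (s.map (fun e => PySem.Dict.getD (PySem.Dict.mk ps) e 0)).sum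
      = (ps.map (fun kv => if kv.1 ∈ s then kv.2 else 0)).sum := by
  induction ps with
  | nil =>
    simp only [List.map_nil, List.sum_nil]
    have : (s.map (fun e => PySem.Dict.getD (PySem.Dict.mk []) e 0)) = s.map (fun _ => (0:Int)) := by
      apply List.map_congr_left; intro e _; rfl
    simp [this]
  | cons p ps' ih =>
    have hk1 : p.1 ∉ ps'.map Prod.fst := (List.nodup_cons.mp hk).1
    have hk' : (ps'.map Prod.fst).Nodup := (List.nodup_cons.mp hk).2
    have hstep : (s.map (fun e => PySem.Dict.getD (PySem.Dict.mk (p :: ps')) e 0))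
        = s.map (fun e => if p.1 = e then p.2 else PySem.Dict.getD (PySem.Dict.mk ps') e 0) := by
      apply List.map_congr_left; intro e _
      rw [PySem.Dict.getD_eq_get?_getD, PySem.Dict.get?_mk_cons]
      by_cases h : p.1 = e
      · simp [h]
      · simp only [beq_iff_eq, h, if_false]
        rw [← PySem.Dict.getD_eq_get?_getD]
    rw [hstep, pv_sum_ite p.1 p.2 _ s hs, pv_getD_not_mem ps' p.1 hk1, ih hk']
    simp

-- B's per-agent score, written as membership-weighted terms over the raw list
theorem pvScoreB_eq (ev : List String) : pvScoreB ev =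
    (if "onion_pickup" ∈ ev then (0:Int) else 0) + (if "useful_onion_pickup" ∈ ev then 2 else 0)
    + (if "useful_onion_drop" ∈ ev then 4 else 0) + (if "optimal_onion_potting" ∈ ev then 1 else 0)
    + (if "viable_onion_potting" ∈ ev then 3 else 0) + (if "soup_cooking" ∈ ev then 4 else 0)
    + (if "useful_dish_pickup" ∈ ev then 3 else 0) + (if "soup_pickup" ∈ ev then 5 else 0)
    + (if "soup_delivery" ∈ ev then 20 else 0) + (if "useless_onion_potting" ∈ ev then -3 else 0)
    + (if "catastrophic_onion_potting" ∈ ev then -6 else 0)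
    + (if "onion_drop" ∈ ev then -3 else 0) + (if "dish_drop" ∈ ev then -4 else 0)
    + (if "onion_drop" ∈ ev ∧ "useful_onion_drop" ∈ ev then 3 else 0)
    + (if "dish_drop" ∈ ev ∧ "useful_dish_drop" ∈ ev then 4 else 0) := by
  simp only [pvScoreB, pvW]
  rw [PySem.List.foldl_add, pv_sum_lookup _ _ (PySem.Set.nodup_ofList ev) (by decide)]
  have hm : ∀ k : String, (k ∈ PySem.Set.ofList ev) ↔ k ∈ ev := fun k => PySem.Set.mem_ofList ev k
  simp only [List.map_cons, List.map_nil, List.sum_cons, List.sum_nil, hm, pv_ite_add]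
  ring

theorem pvAddA_eq (r0 : Int) (ev : List String) : pvAddA r0 ev = r0 + pvScoreB ev := by
  unfold pvAddA
  rw [pvScoreB_eq]
  simp only [pv_ite_add]
  by_cases h1 : "useful_onion_drop" ∈ ev <;>
  by_cases h2 : "useful_dish_drop" ∈ ev <;>
  by_cases h3 : "onion_drop" ∈ ev <;>
  by_cases h4 : "dish_drop" ∈ ev <;>
    simp only [h1, h2, h3, h4, not_true_eq_false, not_false_eq_true, and_true, and_false,
      if_true, if_false] <;> ring

theorem pvScoreB_nil : pvScoreB [] = 0 := by decide

theorem pv_step0 (a b : List String) (rest : List (List String)) :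
    pvStepA (a :: b :: rest) [0, 0] 0 = [pvScoreB a, 0] := by
  unfold pvStepA
  rw [PySem.List.pyGet?_zero_cons]
  by_cases h : a.length ≠ 0
  · simp [h, pvAddA_eq]
  · have ha : a = [] := by simpa using h
    simp [ha, pvScoreB_nil]

theorem pv_step1 (a b : List String) (rest : List (List String)) (x : Int) :
    pvStepA (a :: b :: rest) [x, 0] 1 = [x, pvScoreB b] := by
  unfold pvStepA
  rw [show (1:Int) = ((1:Nat):Int) from rfl, PySem.List.pyGet?_ofNat _ 1 (by simp)]
  by_cases h : b.length ≠ 0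
  · simp [h, pvAddA_eq, PySem.List.pyGetD_ofNat', List.set]
  · have hb : b = [] := by simpa using h
    simp [hb, pvScoreB_nil]

theorem pv_spec' (a b : List String) (rest : List (List String)) :
    calculate_rewards (a :: b :: rest) = calculate_rewards_alt (a :: b :: rest) := by
  have hrange : PySem.List.pyRange 0 2 1 = [0, 1] := by decide
  unfold calculate_rewards calculate_rewards_alt
  rw [hrange]
  simp only [List.foldl_cons, List.foldl_nil, pv_step0, pv_step1,
    PySem.List.pyGet?_zero_cons]
  rw [show (1:Int) = ((1:Nat):Int) from rfl, PySem.List.pyGet?_ofNat _ 1 (by simp)]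
  simp

-- ===== VERDICT (by name: the statement is the Claim_ definition above) =====
theorem calculate_rewards_spec : Claim_equal_calculate_rewards := by
  intro events _ hpre
  unfold Pre_calculate_rewards at hpre
  match events with
  | [] => simp at hpre
  | [a] => simp at hpre
  | a :: b :: rest =>
    unfold Spec_calculate_rewards
    exact pv_spec' a b rest
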